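-- pv_equiv track=rewrite | github.com/evalkov/DeepRank-Ab | scripts/progress_live.py | _stage_mix_text
-- ===== SOURCE A (Python) =====
-- from collections import Counter
--
-- def _stage_mix_text(stage_counts: Counter) -> str:
--     if not stage_counts:
--         return "-"
--     ordered = sorted(stage_counts.items(), key=lambda kv: (-kv[1], kv[0]))
--     top = ordered[:2]
--     txt = ", ".join(f"{k}:{v}" for k, v in top)
--     if len(ordered) > 2:
--         txt += ", ..."
--     return txt
-- ===== SOURCE B (Python) =====
-- from collections import Counter
--
--
-- def _before(a, b):
--     # strict "comes first" under Python's sort key (-count, key)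
--     return a[1] > b[1] or (a[1] == b[1] and a[0] < b[0])
--
--
-- def _stage_mix_text(stage_counts: Counter) -> str:
--     if not stage_counts:
--         return "-"
--     best = None
--     second = None
--     for item in stage_counts.items():
--         if best is None or _before(item, best):
--             best, second = item, best
--         elif second is None or _before(item, second):
--             second = item
--     top = [kv for kv in (best, second) if kv is not None]
--     txt = ", ".join(f"{k}:{v}" for k, v in top)
--     if len(stage_counts) > 2:
--         txt += ", ..."
--     return txt
-- ===== Notes on version B (the rewrite author's own statement) =====
-- stated objective: faster
-- what changed: Replaces the full sort of all items with a single linear pass that maintains only the two best entries under the ordering (-count, key), formatting them afterwards.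
import Mathlib
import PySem

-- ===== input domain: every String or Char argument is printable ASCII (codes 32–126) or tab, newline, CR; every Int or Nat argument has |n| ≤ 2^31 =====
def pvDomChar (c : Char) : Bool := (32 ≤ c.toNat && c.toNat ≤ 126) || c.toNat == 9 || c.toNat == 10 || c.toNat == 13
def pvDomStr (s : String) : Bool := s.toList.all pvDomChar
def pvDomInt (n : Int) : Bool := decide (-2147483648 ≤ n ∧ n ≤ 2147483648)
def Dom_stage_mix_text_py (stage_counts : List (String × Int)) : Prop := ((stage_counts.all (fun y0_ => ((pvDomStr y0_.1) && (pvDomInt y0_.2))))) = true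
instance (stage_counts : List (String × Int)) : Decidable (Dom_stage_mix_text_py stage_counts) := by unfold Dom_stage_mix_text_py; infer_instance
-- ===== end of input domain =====

-- B replaces A's full sort by a single linear pass keeping the two best items; a timing run measures whether that is faster.


-- ===== PORT A =====
def stage_mix_text_py (stage_counts : List (String × Int)) : String :=
  if stage_counts = [] then "-"
  else
    let ordered := PySem.List.sorted2 stage_counts (fun kv => -kv.2) (fun kv => kv.1)
    let top := PySem.List.slice ordered none (some 2)
    let txt := PySem.Str.join ", " (top.map (fun kv => kv.1 ++ ":" ++ PySem.Int.toStr kv.2))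
    if PySem.List.len ordered > 2 then txt ++ ", ..." else txt

-- ===== PORT B =====
-- strict "comes first" under Python's sort key (-count, key)
def pvBefore (a b : String × Int) : Bool := decide (b.2 < a.2) || (decide (a.2 = b.2) && decide (a.1 < b.1))

-- one loop iteration of B: update (best, second)
def pvStep (st : Option (String × Int) × Option (String × Int)) (item : String × Int) :
    Option (String × Int) × Option (String × Int) :=
  match st.1 with
  | none => (some item, st.1)
  | some b =>
    if pvBefore item b then (some item, st.1)
    else
      match st.2 with
      | none => (st.1, some item)
      | some s => if pvBefore item s then (st.1, some item) else st

def stage_mix_text_py_alt (stage_counts : List (String × Int)) : String :=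
  if stage_counts = [] then "-"
  else
    let st := stage_counts.foldl pvStep (none, none)
    let top := [st.1, st.2].filterMap id
    let txt := PySem.Str.join ", " (top.map (fun kv => kv.1 ++ ":" ++ PySem.Int.toStr kv.2))
    if PySem.List.len stage_counts > 2 then txt ++ ", ..." else txt

-- ===== PRECONDITION & SPEC =====
def Spec_stage_mix_text_py (stage_counts : List (String × Int)) (out : String) : Prop := out = stage_mix_text_py_alt stage_counts
instance (stage_counts : List (String × Int)) (out : String) : Decidable (Spec_stage_mix_text_py stage_counts out) := by unfold Spec_stage_mix_text_py; infer_instance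

-- ===== CLAIM (what is proved, stated in full; the proofs are below) =====
def Claim_equal_stage_mix_text_py : Prop := ∀ (stage_counts : List (String × Int)), Dom_stage_mix_text_py stage_counts → Spec_stage_mix_text_py stage_counts (stage_mix_text_py stage_counts)

-- ===== LEMMAS AND PROOFS =====

-- the comparator sorted2 uses for the key pair (-count, key)
def pvLt (a b : String × Int) : Bool :=
  decide ((-a.2 : Int) < -b.2) || (!decide ((-b.2 : Int) < -a.2) && decide (a.1 < b.1))

theorem pvBefore_eq_pvLt (a b : String × Int) : pvBefore a b = pvLt a b := by
  unfold pvBefore pvLt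
  rcases lt_trichotomy a.2 b.2 with h | h | h <;>
    simp [h, not_lt_of_gt] <;> omega

theorem pvStep_insertBy (acc : List (String × Int)) (x : String × Int) :
    pvStep (acc[0]?, acc[1]?) x =
      ((PySem.List.insertBy pvLt x acc)[0]?, (PySem.List.insertBy pvLt x acc)[1]?) := by
  match acc with
  | [] => simp [pvStep, PySem.List.insertBy]
  | [y] =>
    simp only [pvStep, PySem.List.insertBy, pvBefore_eq_pvLt]
    by_cases h : pvLt x y = true <;> simp [h]
  | y :: z :: rest =>
    simp only [pvStep, PySem.List.insertBy, pvBefore_eq_pvLt]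
    by_cases h1 : pvLt x y = true <;> by_cases h2 : pvLt x z = true <;> simp [h1, h2]

theorem pvFoldl_eq (sc : List (String × Int)) (acc : List (String × Int)) :
    sc.foldl pvStep (acc[0]?, acc[1]?) =
      ((sc.foldl (fun l x => PySem.List.insertBy pvLt x l) acc)[0]?,
       (sc.foldl (fun l x => PySem.List.insertBy pvLt x l) acc)[1]?) := by
  induction sc generalizing acc with
  | nil => rfl
  | cons x t ih =>
    simp only [List.foldl_cons, pvStep_insertBy]
    exact ih (PySem.List.insertBy pvLt x acc)

theorem pvTake2_eq (l : List (String × Int)) :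
    [l[0]?, l[1]?].filterMap id = l.take 2 := by
  match l with
  | [] => rfl
  | [a] => rfl
  | a :: b :: t => rfl

theorem pvSorted2_eq (sc : List (String × Int)) :
    PySem.List.sorted2 sc (fun kv => -kv.2) (fun kv => kv.1) =
      sc.foldl (fun l x => PySem.List.insertBy pvLt x l) [] := by
  rfl

theorem pvSlice2 (l : List (String × Int)) :
    PySem.List.slice l none (some 2) = l.take 2 := by
  simp [pysem]

theorem pvLen_sorted2 (sc : List (String × Int)) :
    PySem.List.len (sc.foldl (fun l x => PySem.List.insertBy pvLt x l) []) =
      PySem.List.len sc := by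
  rw [← pvSorted2_eq]
  simp [PySem.List.len, (PySem.List.sorted2_perm sc _ _ _).length_eq]

-- ===== VERDICT (by name: the statement is the Claim_ definition above) =====
theorem stage_mix_text_py_spec : Claim_equal_stage_mix_text_py := by
  intro sc _
  unfold Spec_stage_mix_text_py stage_mix_text_py stage_mix_text_py_alt
  by_cases h : sc = []
  · simp [h]
  · simp only [h, if_false]
    have hfold := pvFoldl_eq sc []
    simp only [List.getElem?_nil] at hfold
    rw [hfold, pvTake2_eq, pvSlice2, pvSorted2_eq, pvLen_sorted2]
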